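-- pv_equiv track=rewrite | github.com/szelemeh/ppg-app | bitmask_test.py | out_of_bitmask
-- ===== SOURCE A (Python) =====
-- def out_of_bitmask(bitmask, x, y, width, height):
--     margin = 2
--     vote = {'yes': 0, 'no': 0}
--     for i in range(x-margin, x+margin):
--         for j in range(y-margin, y+margin):
--             if 0 < i < width and 0 < j < height:
--                 if bitmask[i][j]:
--                     vote['no'] += 1
--                 else:
--                     vote['yes'] += 1
--     return vote['yes'] > vote['no']
-- ===== SOURCE B (Python) =====
-- def out_of_bitmask(bitmask, x, y, width, height):
--     # Closed-form vote: clamp the 4x4 window to the interior once; the region is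
--     # outside the mask iff the clear (zero) cells outnumber half the window area.
--     # Rows and segments are taken by slicing, zeros counted with list.count,
--     # and the 'no' votes are never counted (no = area - yes).
--     lo_i, hi_i = max(x - 2, 1), min(x + 2, width)
--     lo_j, hi_j = max(y - 2, 1), min(y + 2, height)
--     if hi_i <= lo_i or hi_j <= lo_j:
--         return False
--     clear = sum(row[lo_j:hi_j].count(0) for row in bitmask[lo_i:hi_i])
--     return 2 * clear > (hi_i - lo_i) * (hi_j - lo_j)
-- ===== Notes on version B (the rewrite author's own statement) =====
-- stated objective: simpler
-- what changed: B replaces the guarded per-cell double loop with a dict of two counters by clamping the window once, counting only the zero cells via row slicing and list.count, and deciding with the closed-form area comparison 2*clear > area (the 'no' votes are never counted).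
import Mathlib
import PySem

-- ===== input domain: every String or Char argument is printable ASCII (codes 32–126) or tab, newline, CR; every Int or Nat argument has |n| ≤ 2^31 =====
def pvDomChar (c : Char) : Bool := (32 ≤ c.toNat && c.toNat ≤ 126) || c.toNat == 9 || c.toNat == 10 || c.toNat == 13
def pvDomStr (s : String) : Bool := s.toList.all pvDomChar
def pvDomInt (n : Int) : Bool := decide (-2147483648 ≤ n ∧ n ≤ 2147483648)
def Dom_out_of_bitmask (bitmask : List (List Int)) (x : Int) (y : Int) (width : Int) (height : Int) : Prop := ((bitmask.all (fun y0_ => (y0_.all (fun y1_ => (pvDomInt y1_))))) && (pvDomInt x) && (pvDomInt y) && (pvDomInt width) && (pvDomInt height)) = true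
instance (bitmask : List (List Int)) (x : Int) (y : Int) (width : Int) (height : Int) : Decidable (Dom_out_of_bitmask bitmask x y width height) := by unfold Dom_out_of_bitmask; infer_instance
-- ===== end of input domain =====

-- B clamps the window once, counts only the zero cells by slicing each row and
-- list.count, and compares twice that count with the closed-form window area,
-- instead of A's guarded per-cell double loop into a two-counter vote dict
-- (objective: simpler). Return-value equivalence; nothing is mutated.

-- ===== PORT A =====
-- pyGetD's default stands for IndexError; those inputs are excluded by Pre_.
def out_of_bitmask (bitmask : List (List Int)) (x : Int) (y : Int) (width : Int) (height : Int) : Bool :=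
  let margin : Int := 2
  let vote : PySem.Dict String Int := PySem.Dict.ofList [("yes", 0), ("no", 0)]
  let vote := (PySem.List.pyRange (x - margin) (x + margin) 1).foldl (fun vote i =>
    (PySem.List.pyRange (y - margin) (y + margin) 1).foldl (fun vote j =>
      if 0 < i ∧ i < width ∧ 0 < j ∧ j < height then
        if PySem.List.pyGetD (PySem.List.pyGetD bitmask i []) j 0 ≠ 0 then
          vote.insert "no" (vote.getD "no" 0 + 1)
        else
          vote.insert "yes" (vote.getD "yes" 0 + 1)
      else vote) vote) vote
  decide (vote.getD "yes" 0 > vote.getD "no" 0)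

-- ===== PORT B =====
def out_of_bitmask_alt (bitmask : List (List Int)) (x : Int) (y : Int) (width : Int) (height : Int) : Bool :=
  let loI : Int := max (x - 2) 1
  let hiI : Int := min (x + 2) width
  let loJ : Int := max (y - 2) 1
  let hiJ : Int := min (y + 2) height
  if hiI ≤ loI ∨ hiJ ≤ loJ then false
  else
    let clear : Int := ((PySem.List.slice bitmask (some loI) (some hiI)).map
      (fun row => (PySem.List.count (PySem.List.slice row (some loJ) (some hiJ)) 0 : Int))).sum
    decide (2 * clear > (hiI - loI) * (hiJ - loJ))

-- ===== PRECONDITION & SPEC =====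
-- Pre_ excludes exactly the inputs where Python A raises IndexError: a guarded
-- cell (i, j) of the window whose row index or column index is out of range.
def Pre_out_of_bitmask (bitmask : List (List Int)) (x : Int) (y : Int) (width : Int) (height : Int) : Prop :=
  ∀ i ∈ PySem.List.pyRange (x - 2) (x + 2) 1, 0 < i → i < width →
    ∀ j ∈ PySem.List.pyRange (y - 2) (y + 2) 1, 0 < j → j < height →
      i < (bitmask.length : Int) ∧ j < ((PySem.List.pyGetD bitmask i []).length : Int)
instance (bitmask : List (List Int)) (x : Int) (y : Int) (width : Int) (height : Int) : Decidable (Pre_out_of_bitmask bitmask x y width height) := by unfold Pre_out_of_bitmask; infer_instance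

def pvWitness_out_of_bitmask : List (List Int) × Int × Int × Int × Int := ([[0, 0], [0, 0]], 0, 0, 2, 2)

def Spec_out_of_bitmask (bitmask : List (List Int)) (x : Int) (y : Int) (width : Int) (height : Int) (out : Bool) : Prop := out = out_of_bitmask_alt bitmask x y width height
instance (bitmask : List (List Int)) (x : Int) (y : Int) (width : Int) (height : Int) (out : Bool) : Decidable (Spec_out_of_bitmask bitmask x y width height out) := by unfold Spec_out_of_bitmask; infer_instance

-- ===== CLAIM (what is proved, stated in full; the proofs are below) =====
def Claim_equal_out_of_bitmask : Prop := ∀ (bitmask : List (List Int)) (x : Int) (y : Int) (width : Int) (height : Int), Dom_out_of_bitmask bitmask x y width height → Pre_out_of_bitmask bitmask x y width height → Spec_out_of_bitmask bitmask x y width height (out_of_bitmask bitmask x y width height)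

-- ===== LEMMAS AND PROOFS =====

-- proof-side helpers: cell value, per-cell contributions, canonical vote dict
def pvCell (bm : List (List Int)) (i j : Int) : Int :=
  PySem.List.pyGetD (PySem.List.pyGetD bm i []) j 0

def pvD (a b : Int) : PySem.Dict String Int := PySem.Dict.ofList [("yes", a), ("no", b)]

def pvYes (bm : List (List Int)) (w h i j : Int) : Int :=
  if 0 < i ∧ i < w ∧ 0 < j ∧ j < h then (if pvCell bm i j ≠ 0 then 0 else 1) else 0

def pvNo (bm : List (List Int)) (w h i j : Int) : Int :=
  if 0 < i ∧ i < w ∧ 0 < j ∧ j < h then (if pvCell bm i j ≠ 0 then 1 else 0) else 0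

@[simp] theorem pvD_getD_yes (a b : Int) : (pvD a b).getD "yes" 0 = a := rfl
@[simp] theorem pvD_getD_no (a b : Int) : (pvD a b).getD "no" 0 = b := rfl
@[simp] theorem pvD_insert_yes (a b v : Int) : (pvD a b).insert "yes" v = pvD v b := rfl
@[simp] theorem pvD_insert_no (a b v : Int) : (pvD a b).insert "no" v = pvD a v := rfl

theorem pvD_congr {a a' b b' : Int} (h1 : a = a') (h2 : b = b') : pvD a b = pvD a' b' := by
  rw [h1, h2]

theorem pv_sum_map_ite_filter {α : Type} (l : List α) (p : α → Prop) [DecidablePred p]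
    (f : α → Int) :
    (l.map (fun x => if p x then f x else 0)).sum
      = ((l.filter (fun x => decide (p x))).map f).sum := by
  induction l with
  | nil => simp
  | cons a t ih =>
    by_cases hp : p a <;> simp [hp, ih]

-- the guarded indices of a unit range are exactly the clamped unit range
theorem pv_filter_pyRange_clamp (a b w : Int) :
    (PySem.List.pyRange a b 1).filter (fun t => decide (0 < t ∧ t < w))
      = PySem.List.pyRange (max a 1) (min b w) 1 := by
  have hn1 : ((PySem.List.pyRange a b 1).filter (fun t => decide (0 < t ∧ t < w))).Nodup :=
    (PySem.List.nodup_pyRange_one a b).filter _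
  have hn2 := PySem.List.nodup_pyRange_one (max a 1) (min b w)
  have hperm : ((PySem.List.pyRange a b 1).filter (fun t => decide (0 < t ∧ t < w))).Perm
      (PySem.List.pyRange (max a 1) (min b w) 1) := by
    refine (List.perm_ext_iff_of_nodup hn1 hn2).mpr ?_
    intro t
    simp only [List.mem_filter, PySem.List.mem_pyRange_one, decide_eq_true_eq]
    omega
  refine hperm.eq_of_pairwise (fun (p q : Int) _ _ (h1 : p < q) (h2 : q < p) => absurd h2 (not_lt.mpr h1.le)) ?_ ?_
  · exact (PySem.List.pairwise_lt_pyRange_one a b).sublist List.filter_sublist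
  · exact PySem.List.pairwise_lt_pyRange_one _ _

-- A's inner loop: the vote dict keeps its shape; counters grow by the per-row counts
theorem pv_innerA (bm : List (List Int)) (w h i : Int) (js : List Int) :
    ∀ a b : Int,
      js.foldl (fun vote j =>
          if 0 < i ∧ i < w ∧ 0 < j ∧ j < h then
            if PySem.List.pyGetD (PySem.List.pyGetD bm i []) j 0 ≠ 0 then
              vote.insert "no" (vote.getD "no" 0 + 1)
            else
              vote.insert "yes" (vote.getD "yes" 0 + 1)
          else vote) (pvD a b)
        = pvD (a + (js.map (pvYes bm w h i)).sum) (b + (js.map (pvNo bm w h i)).sum) := by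
  induction js with
  | nil => intro a b; simp
  | cons j t ih =>
    intro a b
    simp only [List.foldl_cons, List.map_cons, List.sum_cons]
    by_cases hg : 0 < i ∧ i < w ∧ 0 < j ∧ j < h
    · by_cases hc : PySem.List.pyGetD (PySem.List.pyGetD bm i []) j 0 ≠ 0
      · rw [if_pos hg, if_pos hc]
        simp only [pvD_getD_no, pvD_insert_no, ih]
        simp only [pvYes, pvNo, pvCell]
        rw [if_pos hg, if_pos hg, if_pos hc, if_pos hc]
        exact pvD_congr (by ring) (by ring)
      · rw [if_pos hg, if_neg hc]
        simp only [pvD_getD_yes, pvD_insert_yes, ih]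
        simp only [pvYes, pvNo, pvCell]
        rw [if_pos hg, if_pos hg, if_neg hc, if_neg hc]
        exact pvD_congr (by ring) (by ring)
    · rw [if_neg hg]
      simp only [ih]
      simp only [pvYes, pvNo]
      rw [if_neg hg, if_neg hg]
      exact pvD_congr (by ring) (by ring)

-- A's outer loop over any list of row indices
theorem pv_outerA (bm : List (List Int)) (w h y : Int) (is : List Int) :
    ∀ a b : Int,
      is.foldl (fun vote i =>
          (PySem.List.pyRange (y - 2) (y + 2) 1).foldl (fun vote j =>
            if 0 < i ∧ i < w ∧ 0 < j ∧ j < h then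
              if PySem.List.pyGetD (PySem.List.pyGetD bm i []) j 0 ≠ 0 then
                vote.insert "no" (vote.getD "no" 0 + 1)
              else
                vote.insert "yes" (vote.getD "yes" 0 + 1)
            else vote) vote) (pvD a b)
        = pvD (a + (is.map (fun i => ((PySem.List.pyRange (y - 2) (y + 2) 1).map (pvYes bm w h i)).sum)).sum)
              (b + (is.map (fun i => ((PySem.List.pyRange (y - 2) (y + 2) 1).map (pvNo bm w h i)).sum)).sum) := by
  induction is with
  | nil => intro a b; simp
  | cons i t ih =>
    intro a b
    simp only [List.foldl_cons, List.map_cons, List.sum_cons]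
    rw [pv_innerA bm w h i _ a b, ih]
    exact pvD_congr (by ring) (by ring)

-- characterisation of port A as a comparison of two double sums
theorem pv_A_char (bm : List (List Int)) (x y w h : Int) :
    out_of_bitmask bm x y w h
      = decide (((PySem.List.pyRange (x - 2) (x + 2) 1).map (fun i =>
            ((PySem.List.pyRange (y - 2) (y + 2) 1).map (pvYes bm w h i)).sum)).sum
          > ((PySem.List.pyRange (x - 2) (x + 2) 1).map (fun i =>
            ((PySem.List.pyRange (y - 2) (y + 2) 1).map (pvNo bm w h i)).sum)).sum) := by
  have h0 : (PySem.Dict.ofList [("yes", (0:Int)), ("no", (0:Int))]) = pvD 0 0 := rfl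
  simp only [out_of_bitmask, h0, pv_outerA, zero_add, pvD_getD_yes, pvD_getD_no]

-- a guarded double sum over the full window is the plain double sum over the clamped window
theorem pv_clamp_sum (x y w h : Int) (f : Int → Int → Int) :
    ((PySem.List.pyRange (x - 2) (x + 2) 1).map (fun i =>
        ((PySem.List.pyRange (y - 2) (y + 2) 1).map (fun j =>
          if 0 < i ∧ i < w ∧ 0 < j ∧ j < h then f i j else 0)).sum)).sum
      = ((PySem.List.pyRange (max (x - 2) 1) (min (x + 2) w) 1).map (fun i =>
        ((PySem.List.pyRange (max (y - 2) 1) (min (y + 2) h) 1).map (f i)).sum)).sum := by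
  have hrow : ∀ i : Int,
      ((PySem.List.pyRange (y - 2) (y + 2) 1).map (fun j =>
          if 0 < i ∧ i < w ∧ 0 < j ∧ j < h then f i j else 0)).sum
        = (if 0 < i ∧ i < w then
            ((PySem.List.pyRange (max (y - 2) 1) (min (y + 2) h) 1).map (f i)).sum
          else 0) := by
    intro i
    by_cases hi : 0 < i ∧ i < w
    · rw [if_pos hi]
      have hfun : (fun j => if 0 < i ∧ i < w ∧ 0 < j ∧ j < h then f i j else 0)
          = fun j => if 0 < j ∧ j < h then f i j else 0 := by
        funext j
        by_cases hj : 0 < j ∧ j < h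
        · rw [if_pos ⟨hi.1, hi.2, hj.1, hj.2⟩, if_pos hj]
        · rw [if_neg (by tauto), if_neg hj]
      rw [hfun, pv_sum_map_ite_filter, pv_filter_pyRange_clamp]
    · rw [if_neg hi]
      have hfun : (fun j => if 0 < i ∧ i < w ∧ 0 < j ∧ j < h then f i j else 0)
          = fun _ => (0 : Int) := by
        funext j; rw [if_neg (by tauto)]
      rw [hfun]; simp
  rw [List.map_congr_left (fun i _ => hrow i), pv_sum_map_ite_filter, pv_filter_pyRange_clamp]

-- indexing a list over a unit range of in-bounds indices is slicing it
theorem pv_map_getD_eq_slice {α : Type} (xs : List α) (d : α) (a b : Int)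
    (ha : 0 ≤ a) (hab : a ≤ b) (hb : b ≤ (xs.length : Int)) :
    (PySem.List.pyRange a b 1).map (fun i => PySem.List.pyGetD xs i d)
      = PySem.List.slice xs (some a) (some b) := by
  rw [PySem.List.slice_toNat xs ha (by omega), PySem.List.pyRange_one, List.map_map]
  refine List.ext_getElem ?_ ?_
  · simp only [List.length_map, List.length_range, List.length_take, List.length_drop]
    omega
  · intro k h1 h2
    have hlen : k < (b - a).toNat := by simpa using h1
    simp only [List.getElem_map, List.getElem_range, Function.comp, List.getElem_take,
      List.getElem_drop]
    rw [PySem.List.pyGetD_eq_getElem xs d (by omega) (by omega)]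
    congr 1
    omega

-- a 0/1 indicator sum over a slice's indices is list.count on the slice
theorem pv_row_count (row : List Int) (a b : Int) (ha : 0 ≤ a) (hab : a ≤ b) (hb : b ≤ (row.length : Int)) :
    ((PySem.List.pyRange a b 1).map (fun j =>
        if PySem.List.pyGetD row j 0 = 0 then (1 : Int) else 0)).sum
      = (PySem.List.count (PySem.List.slice row (some a) (some b)) 0 : Int) := by
  have : ((PySem.List.pyRange a b 1).map (fun j =>
      if PySem.List.pyGetD row j 0 = 0 then (1 : Int) else 0)).sum
    = (((PySem.List.pyRange a b 1).map (fun j => PySem.List.pyGetD row j 0)).map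
        (fun v => if v = 0 then (1 : Int) else 0)).sum := by
    rw [List.map_map]; rfl
  rw [this, pv_map_getD_eq_slice row 0 a b ha hab hb]
  have hb2 : (fun v : Int => if v = 0 then (1 : Int) else 0)
      = fun v : Int => if (v == 0) = true then (1 : Int) else 0 := by
    funext v; simp
  rw [hb2, PySem.List.sum_map_ite_one_zero, PySem.List.count_eq]
  rw [List.count_eq_countP]

-- constant sum: each clamped row contributes its length
theorem pv_sum_const (l : List Int) (c : Int) : (l.map (fun _ => c)).sum = (l.length : Int) * c := by
  induction l with
  | nil => simp
  | cons a t ih => simp only [List.map_cons, List.sum_cons, List.length_cons, ih]; push_cast; ring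

-- ===== VERDICT (by name: the statement is the Claim_ definition above) =====
theorem out_of_bitmask_spec : Claim_equal_out_of_bitmask := by
  intro bm x y w h _ hpre
  unfold Spec_out_of_bitmask
  rw [pv_A_char]
  have hY : ∀ i : Int, pvYes bm w h i = fun j =>
      if 0 < i ∧ i < w ∧ 0 < j ∧ j < h then (if pvCell bm i j ≠ 0 then (0 : Int) else 1) else 0 :=
    fun i => rfl
  have hN : ∀ i : Int, pvNo bm w h i = fun j =>
      if 0 < i ∧ i < w ∧ 0 < j ∧ j < h then (if pvCell bm i j ≠ 0 then (1 : Int) else 0) else 0 :=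
    fun i => rfl
  simp only [hY, hN]
  rw [pv_clamp_sum x y w h (fun i j => if pvCell bm i j ≠ 0 then 0 else 1),
      pv_clamp_sum x y w h (fun i j => if pvCell bm i j ≠ 0 then 1 else 0)]
  simp only [out_of_bitmask_alt]
  set LI := max (x - 2) 1 with hLI
  set HI := min (x + 2) w with hHI
  set LJ := max (y - 2) 1 with hLJ
  set HJ := min (y + 2) h with hHJ
  by_cases hempty : HI ≤ LI ∨ HJ ≤ LJ
  · rw [if_pos hempty]
    rcases hempty with hcase | hcase
    · rw [PySem.List.pyRange_one_eq_nil hcase]; simp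
    · rw [PySem.List.pyRange_one_eq_nil hcase]; simp
  · rw [if_neg hempty]
    rw [not_or] at hempty
    simp only [not_le] at hempty
    obtain ⟨hIne, hJne⟩ := hempty
    -- bounds from Pre_: HI ≤ len bm, and HJ ≤ len row for each clamped i
    have hbm : HI ≤ (bm.length : Int) := by
      have := hpre (HI - 1) (by rw [PySem.List.mem_pyRange_one]; omega)
        (by omega) (by omega) LJ (by rw [PySem.List.mem_pyRange_one]; omega)
        (by omega) (by omega)
      omega
    have hrowlen : ∀ i ∈ PySem.List.pyRange LI HI 1,
        HJ ≤ ((PySem.List.pyGetD bm i []).length : Int) := by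
      intro i hi
      rw [PySem.List.mem_pyRange_one] at hi
      have := hpre i (by rw [PySem.List.mem_pyRange_one]; omega)
        (by omega) (by omega) (HJ - 1) (by rw [PySem.List.mem_pyRange_one]; omega)
        (by omega) (by omega)
      omega
    -- yes-count equals B's clear count
    have hclear :
        ((PySem.List.pyRange LI HI 1).map (fun i =>
            ((PySem.List.pyRange LJ HJ 1).map (fun j =>
              if pvCell bm i j ≠ 0 then (0 : Int) else 1)).sum)).sum
          = ((PySem.List.slice bm (some LI) (some HI)).map
              (fun row => (PySem.List.count (PySem.List.slice row (some LJ) (some HJ)) 0 : Int))).sum := by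
      rw [← pv_map_getD_eq_slice bm [] LI HI (by omega) (by omega) hbm, List.map_map]
      refine congrArg List.sum (List.map_congr_left ?_)
      intro i hi
      have hrc := pv_row_count (PySem.List.pyGetD bm i []) LJ HJ (by omega) (by omega) (hrowlen i hi)
      simp only [Function.comp]
      rw [← hrc]
      refine congrArg List.sum (List.map_congr_left ?_)
      intro j _
      by_cases hc : PySem.List.pyGetD (PySem.List.pyGetD bm i []) j 0 = 0
      · simp [pvCell, hc]
      · simp [pvCell, hc]
    -- yes + no = area
    have harea :
        ((PySem.List.pyRange LI HI 1).map (fun i =>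
            ((PySem.List.pyRange LJ HJ 1).map (fun j =>
              if pvCell bm i j ≠ 0 then (0 : Int) else 1)).sum)).sum
        + ((PySem.List.pyRange LI HI 1).map (fun i =>
            ((PySem.List.pyRange LJ HJ 1).map (fun j =>
              if pvCell bm i j ≠ 0 then (1 : Int) else 0)).sum)).sum
          = (HI - LI) * (HJ - LJ) := by
      rw [← PySem.List.sum_map_add_int]
      have hinner : ∀ i : Int,
          ((PySem.List.pyRange LJ HJ 1).map (fun j =>
              if pvCell bm i j ≠ 0 then (0 : Int) else 1)).sum
          + ((PySem.List.pyRange LJ HJ 1).map (fun j =>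
              if pvCell bm i j ≠ 0 then (1 : Int) else 0)).sum = HJ - LJ := by
        intro i
        rw [← PySem.List.sum_map_add_int]
        have : ((PySem.List.pyRange LJ HJ 1).map (fun j =>
            (if pvCell bm i j ≠ 0 then (0 : Int) else 1)
            + (if pvCell bm i j ≠ 0 then (1 : Int) else 0))).sum
          = ((PySem.List.pyRange LJ HJ 1).map (fun _ => (1 : Int))).sum := by
          refine congrArg List.sum (List.map_congr_left ?_)
          intro j _
          by_cases hc : pvCell bm i j ≠ 0 <;> simp [hc]
        rw [this, pv_sum_const, PySem.List.length_pyRange_one]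
        omega
      have : ((PySem.List.pyRange LI HI 1).map (fun i =>
          ((PySem.List.pyRange LJ HJ 1).map (fun j =>
            if pvCell bm i j ≠ 0 then (0 : Int) else 1)).sum
          + ((PySem.List.pyRange LJ HJ 1).map (fun j =>
            if pvCell bm i j ≠ 0 then (1 : Int) else 0)).sum)).sum
        = ((PySem.List.pyRange LI HI 1).map (fun _ => HJ - LJ)).sum := by
        exact congrArg List.sum (List.map_congr_left (fun i _ => hinner i))
      rw [this, pv_sum_const, PySem.List.length_pyRange_one]
      have : ((HI - LI).toNat : Int) = HI - LI := by omega
      rw [this]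
    rw [hclear] at *
    exact decide_eq_decide.mpr (by omega)
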